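-- pv_equiv track=rewrite | github.com/Wowi07/School | RPC.py | make_statement
-- ===== SOURCE A (Python) =====
-- def make_statement(statement, decoration, lines=1):
--     """This one makes a decorated statement, defaults to a single line
--     :parameter statement, decoration, lines(optional)
--     :return nothing!
--     """
--     res=""
--     lines = int(lines)
--     for i in range(0, lines):
--         if i == int(lines / 2):
--             res=res+f"{decoration * 3} {statement} {decoration * 3}\n"
--         else:
--             res+=decoration * (len(statement) + 8) +"\n"
--     return res
-- ===== SOURCE B (Python) =====
-- def make_statement(statement, decoration, lines=1):
--     """This one makes a decorated statement, defaults to a single line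
--     :parameter statement, decoration, lines(optional)
--     :return nothing!
--     """
--     lines = int(lines)
--     if lines < 1:
--         return ""
--     stmt_line = f"{decoration * 3} {statement} {decoration * 3}\n"
--     if lines == 1:
--         return stmt_line
--     mid = lines // 2
--     filler = decoration * (len(statement) + 8) + "\n"
--     return filler * mid + stmt_line + filler * (lines - mid - 1)
-- ===== Notes on version B (the rewrite author's own statement) =====
-- stated objective: simpler
-- what changed: Replaces the per-line loop with an index-equality branch by a closed form: the banner is filler-line repeated mid times, the statement line, then filler repeated lines-mid-1 times, built with string multiplication.
import Mathlib
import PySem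

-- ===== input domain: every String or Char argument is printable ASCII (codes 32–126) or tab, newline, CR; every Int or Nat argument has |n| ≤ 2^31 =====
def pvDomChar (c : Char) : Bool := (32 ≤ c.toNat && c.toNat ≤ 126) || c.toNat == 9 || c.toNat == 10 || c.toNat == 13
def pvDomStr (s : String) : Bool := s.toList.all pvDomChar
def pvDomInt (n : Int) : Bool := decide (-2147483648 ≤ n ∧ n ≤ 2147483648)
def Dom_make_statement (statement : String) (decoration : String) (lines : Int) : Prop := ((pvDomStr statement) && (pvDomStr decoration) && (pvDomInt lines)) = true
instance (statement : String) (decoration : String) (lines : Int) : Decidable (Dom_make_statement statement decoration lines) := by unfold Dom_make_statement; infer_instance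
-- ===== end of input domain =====

-- B replaces A's per-line loop (with an index==mid branch) by a closed form built with
-- string multiplication: filler*mid + statement line + filler*(lines-mid-1); objective: simpler.


-- Python string concatenation `x + y`, written transparently over the character lists
def pyCat (a b : String) : String := String.ofList (a.toList ++ b.toList)

-- Python string repetition `s * n` (n ≤ 0 gives "")
def pyStrMul (s : String) (n : Int) : String :=
  Nat.rec "" (fun _ acc => pyCat s acc) n.toNat

-- ===== PORT A =====
def make_statement (statement : String) (decoration : String) (lines : Int) : String :=
  -- res = ""; for i in range(0, lines): if i == int(lines/2): res += f"..."; else: res += ...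
  let mid : Int := lines / 2    -- int(lines / 2): exact for |lines| ≤ 2^31
  (PySem.List.pyRange 0 lines 1).foldl
    (fun res i =>
      if i = mid then
        pyCat res (pyCat (pyStrMul decoration 3) (pyCat " " (pyCat statement
          (pyCat " " (pyCat (pyStrMul decoration 3) "\n")))))
      else
        pyCat res (pyCat (pyStrMul decoration (PySem.Str.len statement + 8)) "\n"))
    ""

-- ===== PORT B =====
def make_statement_alt (statement : String) (decoration : String) (lines : Int) : String :=
  if lines < 1 then ""
  else
    let stmtLine := pyCat (pyStrMul decoration 3) (pyCat " " (pyCat statement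
      (pyCat " " (pyCat (pyStrMul decoration 3) "\n"))))
    if lines = 1 then stmtLine
    else
      let mid : Int := lines / 2
      let filler := pyCat (pyStrMul decoration (PySem.Str.len statement + 8)) "\n"
      pyCat (pyCat (pyStrMul filler mid) stmtLine) (pyStrMul filler (lines - mid - 1))

-- ===== PRECONDITION & SPEC =====
def Spec_make_statement (statement : String) (decoration : String) (lines : Int) (out : String) : Prop := out = make_statement_alt statement decoration lines
instance (statement : String) (decoration : String) (lines : Int) (out : String) : Decidable (Spec_make_statement statement decoration lines out) := by unfold Spec_make_statement; infer_instance

-- ===== CLAIM (what is proved, stated in full; the proofs are below) =====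
def Claim_equal_make_statement : Prop := ∀ (statement : String) (decoration : String) (lines : Int), Dom_make_statement statement decoration lines → Spec_make_statement statement decoration lines (make_statement statement decoration lines)

-- ===== LEMMAS AND PROOFS =====

theorem pyCat_assoc (a b c : String) : pyCat (pyCat a b) c = pyCat a (pyCat b c) := by
  simp [pyCat, List.append_assoc]

theorem pyCat_empty (a : String) : pyCat a "" = a := by
  simp [pyCat]

theorem empty_pyCat (a : String) : pyCat "" a = a := by
  simp [pyCat]

-- repetition by a Nat count, the shape pyStrMul reduces to
def repS (s : String) : Nat → String
  | 0 => ""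
  | n + 1 => pyCat s (repS s n)

theorem pyStrMul_eq_repS (s : String) (n : Int) : pyStrMul s n = repS s n.toNat := by
  unfold pyStrMul
  induction n.toNat with
  | zero => rfl
  | succ k ih => simpa [repS] using congrArg (pyCat s) ih

-- the string A's loop body appends on step i, given the mid line S and filler line F
def bf (mid : Int) (S F : String) : Int → Nat → String
  | _, 0 => ""
  | a, n + 1 => pyCat (if a = mid then S else F) (bf mid S F (a + 1) n)

theorem foldl_bf (mid : Int) (S F : String) :
    ∀ (n : Nat) (a b : Int), (b - a).toNat = n → ∀ acc : String,
      (PySem.List.pyRange a b 1).foldl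
        (fun res i => if i = mid then pyCat res S else pyCat res F) acc
      = pyCat acc (bf mid S F a n) := by
  intro n
  induction n with
  | zero =>
    intro a b h acc
    rw [PySem.List.pyRange_one_eq_nil (by omega)]
    simp [bf, pyCat_empty]
  | succ k ih =>
    intro a b h acc
    rw [PySem.List.pyRange_one_cons (by omega)]
    simp only [List.foldl_cons]
    rw [ih (a + 1) b (by omega)]
    by_cases hc : a = mid <;> simp [bf, hc, pyCat_assoc]

theorem bf_eq (mid : Int) (S F : String) :
    ∀ (n : Nat) (a : Int),
      bf mid S F a n =
        if a ≤ mid ∧ mid < a + (n : Int) then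
          pyCat (pyCat (repS F (mid - a).toNat) S) (repS F (a + (n : Int) - mid - 1).toNat)
        else repS F n := by
  intro n
  induction n with
  | zero => intro a; simp [bf, repS]
  | succ k ih =>
    intro a
    rw [bf, ih (a + 1)]
    by_cases h1 : a = mid
    · -- the head line is the statement line; mid is not in the tail
      subst h1
      rw [if_pos rfl, if_neg (by omega), if_pos (by omega),
          show (a - a).toNat = 0 by omega,
          show (a + ((k + 1 : Nat) : Int) - a - 1).toNat = k by omega]
      simp [repS, empty_pyCat]
    · rw [if_neg h1]
      by_cases h2 : a + 1 ≤ mid ∧ mid < a + 1 + (k : Int)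
      · -- head is a filler line, the statement line lies in the tail
        rw [if_pos h2, if_pos (by omega),
            show (mid - a).toNat = (mid - (a + 1)).toNat + 1 by omega,
            show (a + ((k + 1 : Nat) : Int) - mid - 1).toNat = (a + 1 + (k : Int) - mid - 1).toNat by omega]
        simp [repS, pyCat_assoc]
      · -- mid outside the whole range: all filler
        rw [if_neg h2, if_neg (by omega)]
        simp [repS]

-- ===== VERDICT (by name: the statement is the Claim_ definition above) =====
theorem make_statement_spec : Claim_equal_make_statement := by
  intro statement decoration lines _
  unfold Spec_make_statement make_statement make_statement_alt
  set S := pyCat (pyStrMul decoration 3) (pyCat " " (pyCat statement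
    (pyCat " " (pyCat (pyStrMul decoration 3) "\n")))) with hS
  set F := pyCat (pyStrMul decoration (PySem.Str.len statement + 8)) "\n" with hF
  set mid : Int := lines / 2 with hmid
  rw [foldl_bf mid S F ((lines - 0).toNat) 0 lines (by omega), empty_pyCat,
      bf_eq mid S F]
  by_cases h1 : lines < 1
  · rw [show (lines - 0).toNat = 0 by omega, if_neg (by omega), if_pos h1]
    rfl
  · have hmid0 : 0 ≤ mid := by omega
    have hmidlt : mid < lines := by omega
    rw [if_pos (by constructor <;> omega), if_neg h1]
    by_cases h2 : lines = 1
    · have hm : mid = 0 := by omega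
      rw [if_pos h2,
          show (mid - 0).toNat = 0 by omega,
          show (0 + ((lines - 0).toNat : Int) - mid - 1).toNat = 0 by omega]
      simp [repS, empty_pyCat, pyCat_empty]
    · rw [if_neg h2]
      simp only [pyStrMul_eq_repS]
      rw [show (mid - 0).toNat = mid.toNat by omega,
          show (0 + ((lines - 0).toNat : Int) - mid - 1).toNat = (lines - mid - 1).toNat by omega]
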